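-- pv_equiv track=rewrite | github.com/X66YSH/aml-pipeline | s2a/src/backend/services/s2f_service.py | _extract_code_pra
-- ===== SOURCE A (Python) =====
-- def _extract_code_pra(code: str) -> dict:
--     """Extract PERCEIVE and REASON comments from generated feature code."""
--     perceive = ""
--     reason = ""
--     for line in code.splitlines():
--         stripped = line.strip()
--         if stripped.startswith("# PERCEIVE:"):
--             perceive = stripped[len("# PERCEIVE:"):].strip()
--         elif stripped.startswith("# REASON:"):
--             reason = stripped[len("# REASON:"):].strip()
--     return {"perceive": perceive, "reason": reason}
-- ===== SOURCE B (Python) =====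
-- def _extract_code_pra(code: str) -> dict:
--     """Extract PERCEIVE and REASON comments from generated feature code.
--
--     Scans the lines in reverse and keeps the first hit for each tag,
--     stopping as soon as both have been found.
--     """
--     perceive = None
--     reason = None
--     for line in reversed(code.splitlines()):
--         stripped = line.strip()
--         if perceive is None and stripped.startswith("# PERCEIVE:"):
--             perceive = stripped[len("# PERCEIVE:"):].strip()
--         elif reason is None and stripped.startswith("# REASON:"):
--             reason = stripped[len("# REASON:"):].strip()
--         if perceive is not None and reason is not None:
--             break
--     return {"perceive": perceive if perceive is not None else "",
--             "reason": reason if reason is not None else ""}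
-- ===== Notes on version B (the rewrite author's own statement) =====
-- stated objective: alternative
-- what changed: B scans the lines in reverse, records the first PERCEIVE/REASON hit for each tag (A keeps overwriting to get the last forward hit) and breaks early once both are found.
import Mathlib
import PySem

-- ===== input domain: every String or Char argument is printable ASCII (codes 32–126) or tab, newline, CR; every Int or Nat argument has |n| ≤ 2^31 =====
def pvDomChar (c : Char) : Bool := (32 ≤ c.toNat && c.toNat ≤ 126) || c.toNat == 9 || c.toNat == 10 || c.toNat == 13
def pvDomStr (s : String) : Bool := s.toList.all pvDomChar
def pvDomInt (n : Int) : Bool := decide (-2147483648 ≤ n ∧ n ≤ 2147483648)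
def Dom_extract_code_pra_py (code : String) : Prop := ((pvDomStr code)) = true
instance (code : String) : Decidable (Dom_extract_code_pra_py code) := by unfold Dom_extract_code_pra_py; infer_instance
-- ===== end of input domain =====

-- B scans the lines in reverse with early exit instead of A's overwrite-to-the-last forward fold; same result, alternative algorithm.

-- ===== PORT A =====
def extract_code_pra_py (code : String) : List (String × String) :=
  let st := (PySem.Str.splitlines code).foldl
    (fun (acc : String × String) line =>
      let stripped := PySem.Str.strip line
      if PySem.Str.startswith stripped "# PERCEIVE:" then
        (PySem.Str.strip (PySem.Str.slice stripped (some 11) none), acc.2)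
      else if PySem.Str.startswith stripped "# REASON:" then
        (acc.1, PySem.Str.strip (PySem.Str.slice stripped (some 9) none))
      else acc)
    ("", "")
  [("perceive", st.1), ("reason", st.2)]

-- ===== PORT B =====
-- reverse scan, first hit per tag, early break once both are found (Source B's loop)
def praGoB : List String → Option String → Option String → String × String
  | [], p, r => (p.getD "", r.getD "")
  | line :: rest, p, r =>
    let stripped := PySem.Str.strip line
    let pr :=
      if p.isNone && PySem.Str.startswith stripped "# PERCEIVE:" then
        (some (PySem.Str.strip (PySem.Str.slice stripped (some 11) none)), r)
      else if r.isNone && PySem.Str.startswith stripped "# REASON:" then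
        (p, some (PySem.Str.strip (PySem.Str.slice stripped (some 9) none)))
      else (p, r)
    match pr with
    | (some pv, some rv) => (pv, rv)
    | (p', r') => praGoB rest p' r'

def extract_code_pra_py_alt (code : String) : List (String × String) :=
  let st := praGoB (PySem.Str.splitlines code).reverse none none
  [("perceive", st.1), ("reason", st.2)]

-- ===== PRECONDITION & SPEC =====
def Spec_extract_code_pra_py (code : String) (out : List (String × String)) : Prop := out = extract_code_pra_py_alt code
instance (code : String) (out : List (String × String)) : Decidable (Spec_extract_code_pra_py code out) := by unfold Spec_extract_code_pra_py; infer_instance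

-- ===== CLAIM (what is proved, stated in full; the proofs are below) =====
def Claim_equal_extract_code_pra_py : Prop := ∀ (code : String), Dom_extract_code_pra_py code → Spec_extract_code_pra_py code (extract_code_pra_py code)

-- ===== LEMMAS AND PROOFS =====

def praTryP (line : String) : Option String :=
  let s := PySem.Str.strip line
  if PySem.Str.startswith s "# PERCEIVE:" then
    some (PySem.Str.strip (PySem.Str.slice s (some 11) none)) else none

def praTryR (line : String) : Option String :=
  let s := PySem.Str.strip line
  if PySem.Str.startswith s "# REASON:" then
    some (PySem.Str.strip (PySem.Str.slice s (some 9) none)) else none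

-- a line cannot start with both tags
theorem pra_excl (s : List Char)
    (h : PySem.Chars.startswith s ['#', ' ', 'P', 'E', 'R', 'C', 'E', 'I', 'V', 'E', ':'] = true) :
    PySem.Chars.startswith s ['#', ' ', 'R', 'E', 'A', 'S', 'O', 'N', ':'] = false := by
  by_contra hne
  have h2 : PySem.Chars.startswith s ['#', ' ', 'R', 'E', 'A', 'S', 'O', 'N', ':'] = true := by
    cases hh : PySem.Chars.startswith s ['#', ' ', 'R', 'E', 'A', 'S', 'O', 'N', ':'] <;> simp_all
  rw [PySem.Chars.startswith_iff] at h h2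
  have := List.prefix_of_prefix_length_le h2 h (by decide)
  revert this; decide

theorem headD_append {α : Type} (xs ys : List α) (d : α) :
    (xs ++ ys).headD d = xs.headD (ys.headD d) := by
  cases xs <;> simp

theorem praGoB_char (ls : List String) (p r : Option String) :
    praGoB ls p r = (p.getD ((ls.filterMap praTryP).headD ""),
                     r.getD ((ls.filterMap praTryR).headD "")) := by
  induction ls generalizing p r with
  | nil => simp [praGoB]
  | cons line rest ih =>
    by_cases hP : PySem.Chars.startswith (PySem.Chars.strip line.toList) ['#', ' ', 'P', 'E', 'R', 'C', 'E', 'I', 'V', 'E', ':'] = true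
    · have hR := pra_excl _ hP
      cases p with
      | none =>
        cases r with
        | none => simp [praGoB, hP, hR, ih, praTryP, praTryR]
        | some rv => simp [praGoB, hP, hR, praTryP, praTryR]
      | some pv =>
        cases r with
        | none => simp [praGoB, hP, hR, ih, praTryP, praTryR]
        | some rv => simp [praGoB, hP, hR, praTryP, praTryR]
    · by_cases hQ : PySem.Chars.startswith (PySem.Chars.strip line.toList) ['#', ' ', 'R', 'E', 'A', 'S', 'O', 'N', ':'] = true
      · cases p with
        | none =>
          cases r with
          | none => simp [praGoB, hP, hQ, ih, praTryP, praTryR]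
          | some rv => simp [praGoB, hP, hQ, ih, praTryP, praTryR]
        | some pv =>
          cases r with
          | none => simp [praGoB, hP, hQ, praTryP, praTryR]
          | some rv => simp [praGoB, hP, hQ, praTryP, praTryR]
      · cases p with
        | none =>
          cases r with
          | none => simp [praGoB, hP, hQ, ih, praTryP, praTryR]
          | some rv => simp [praGoB, hP, hQ, ih, praTryP, praTryR]
        | some pv =>
          cases r with
          | none => simp [praGoB, hP, hQ, ih, praTryP, praTryR]
          | some rv => simp [praGoB, hP, hQ, praTryP, praTryR]

theorem praFold_char (ls : List String) (p r : String) :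
    ls.foldl
      (fun (acc : String × String) line =>
        let stripped := PySem.Str.strip line
        if PySem.Str.startswith stripped "# PERCEIVE:" then
          (PySem.Str.strip (PySem.Str.slice stripped (some 11) none), acc.2)
        else if PySem.Str.startswith stripped "# REASON:" then
          (acc.1, PySem.Str.strip (PySem.Str.slice stripped (some 9) none))
        else acc)
      (p, r)
    = ((ls.reverse.filterMap praTryP).headD p,
       (ls.reverse.filterMap praTryR).headD r) := by
  induction ls generalizing p r with
  | nil => simp
  | cons line rest ih =>
    simp only [List.foldl_cons, List.reverse_cons, List.filterMap_append, headD_append]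
    by_cases hP : PySem.Chars.startswith (PySem.Chars.strip line.toList) ['#', ' ', 'P', 'E', 'R', 'C', 'E', 'I', 'V', 'E', ':'] = true
    · have hR := pra_excl _ hP
      simp [hP, hR, praTryP, praTryR] at ih ⊢
      rw [ih]
    · by_cases hQ : PySem.Chars.startswith (PySem.Chars.strip line.toList) ['#', ' ', 'R', 'E', 'A', 'S', 'O', 'N', ':'] = true
      · simp [hP, hQ, praTryP, praTryR] at ih ⊢
        rw [ih]
      · simp [hP, hQ, praTryP, praTryR] at ih ⊢
        rw [ih]

-- ===== VERDICT (by name: the statement is the Claim_ definition above) =====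
theorem extract_code_pra_py_spec : Claim_equal_extract_code_pra_py := by
  intro code _
  unfold Spec_extract_code_pra_py extract_code_pra_py extract_code_pra_py_alt
  rw [praFold_char, praGoB_char]
  simp
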